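-- pv_equiv track=rewrite | github.com/CORACAKUN/ai-meal-planner-backend | backend/api/views.py | get_activity_level_from_activities
-- ===== SOURCE A (Python) =====
-- ACTIVITY_LEVELS = {
--     # sedentary (little/no exercise)
--     "sitting": "sedentary",
--     "desk_work": "sedentary",
--     "office_job": "sedentary",
--
--     # light (1-3 days light exercise)
--     "walking": "light",
--     "gentle_yoga": "light",
--     "casual_cycling": "light",
--     "stretching": "light",
--
--     # moderate (3-4 days moderate exercise)
--     "jogging": "moderate",
--     "running": "moderate",
--     "swimming": "moderate",
--     "basketball": "moderate",
--     "soccer": "moderate",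
--     "gym_workout": "moderate",
--     "dancing": "moderate",
--     "hiking": "moderate",
--
--     # active (5-6 days intense exercise)
--     "sprinting": "active",
--     "crossfit": "active",
--     "competitive_sports": "active",
--     "weight_training": "active",
--     "martial_arts": "active",
--
--     # very active (daily intense exercise)
--     "professional_athlete": "very_active",
--     "intense_daily_training": "very_active",
--     "construction_work": "very_active",
-- }
--
-- def get_activity_level_from_activities(activities_str):
--     """
--     Convert comma-separated activities to overall activity level.
--     Returns the highest activity level found.
--     """
--     if not activities_str:
--         return "sedentary"
--
--     activities = [a.strip().lower() for a in activities_str.split(",") if a.strip()]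
--     if not activities:
--         return "sedentary"
--
--     level_hierarchy = {"sedentary": 0, "light": 1, "moderate": 2, "active": 3, "very_active": 4}
--     max_level = "sedentary"
--     max_level_value = 0
--
--     for activity in activities:
--         level = ACTIVITY_LEVELS.get(activity, "moderate")  # default to moderate if unknown
--         level_value = level_hierarchy.get(level, 2)
--         if level_value > max_level_value:
--             max_level = level
--             max_level_value = level_value
--
--     return max_level
-- ===== SOURCE B (Python) =====
-- ACTIVITY_LEVELS = {
--     "sitting": "sedentary",
--     "desk_work": "sedentary",
--     "office_job": "sedentary",
--     "walking": "light",
--     "gentle_yoga": "light",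
--     "casual_cycling": "light",
--     "stretching": "light",
--     "jogging": "moderate",
--     "running": "moderate",
--     "swimming": "moderate",
--     "basketball": "moderate",
--     "soccer": "moderate",
--     "gym_workout": "moderate",
--     "dancing": "moderate",
--     "hiking": "moderate",
--     "sprinting": "active",
--     "crossfit": "active",
--     "competitive_sports": "active",
--     "weight_training": "active",
--     "martial_arts": "active",
--     "professional_athlete": "very_active",
--     "intense_daily_training": "very_active",
--     "construction_work": "very_active",
-- }
--
--
-- def get_activity_level_from_activities(activities_str):
--     if not activities_str:
--         return "sedentary"
--     activities = [a.strip().lower() for a in activities_str.split(",") if a.strip()]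
--     if not activities:
--         return "sedentary"
--     present = {ACTIVITY_LEVELS.get(a, "moderate") for a in activities}
--     for level in ("very_active", "active", "moderate", "light", "sedentary"):
--         if level in present:
--             return level
--     return "sedentary"  # unreachable: present is nonempty and holds only known levels
-- ===== Notes on version B (the rewrite author's own statement) =====
-- stated objective: alternative
-- what changed: Replaced the running-max accumulator (best level + its numeric value carried through the loop) with a collect-then-select pass: build the set of levels present, then return the first hit scanning a fixed priority list from highest to lowest.
import Mathlib
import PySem

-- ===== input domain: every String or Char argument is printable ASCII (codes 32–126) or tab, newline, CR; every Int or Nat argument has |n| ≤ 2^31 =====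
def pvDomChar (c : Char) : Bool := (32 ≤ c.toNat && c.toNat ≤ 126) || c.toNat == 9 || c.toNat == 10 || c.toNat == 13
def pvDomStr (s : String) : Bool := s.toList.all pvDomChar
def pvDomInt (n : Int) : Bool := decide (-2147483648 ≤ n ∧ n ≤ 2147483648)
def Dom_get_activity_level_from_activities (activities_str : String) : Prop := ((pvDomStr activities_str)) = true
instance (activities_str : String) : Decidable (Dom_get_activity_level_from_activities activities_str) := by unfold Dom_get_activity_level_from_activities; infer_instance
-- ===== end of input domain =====

-- B replaces A's running-max accumulator by collecting the set of levels present and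
-- scanning a fixed highest-to-lowest priority list; same cost, different decomposition.

-- module constant ACTIVITY_LEVELS (used by both A and B, as in the Python module)
def ACTIVITY_LEVELS : PySem.Dict String String := PySem.Dict.ofList [
  ("sitting", "sedentary"), ("desk_work", "sedentary"), ("office_job", "sedentary"),
  ("walking", "light"), ("gentle_yoga", "light"), ("casual_cycling", "light"), ("stretching", "light"),
  ("jogging", "moderate"), ("running", "moderate"), ("swimming", "moderate"), ("basketball", "moderate"),
  ("soccer", "moderate"), ("gym_workout", "moderate"), ("dancing", "moderate"), ("hiking", "moderate"),
  ("sprinting", "active"), ("crossfit", "active"), ("competitive_sports", "active"),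
  ("weight_training", "active"), ("martial_arts", "active"),
  ("professional_athlete", "very_active"), ("intense_daily_training", "very_active"),
  ("construction_work", "very_active")]

-- shared parsing line: [a.strip().lower() for a in activities_str.split(",") if a.strip()]
def parseActivities (activities_str : String) : List String :=
  -- split? is always some here (the separator "," is nonempty), so .getD [] is exact
  (((PySem.Str.split? activities_str ",").getD []).filter (fun a => PySem.Str.strip a ≠ "")).map
    (fun a => PySem.Str.lower (PySem.Str.strip a))

-- ===== PORT A =====
-- level_hierarchy, a dict local to A
def levelHierarchy : PySem.Dict String Int :=
  PySem.Dict.ofList [("sedentary", 0), ("light", 1), ("moderate", 2), ("active", 3), ("very_active", 4)]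

-- the body of A's for-loop (running max over (max_level, max_level_value))
def stepA (st : String × Int) (activity : String) : String × Int :=
  let level := ACTIVITY_LEVELS.getD activity "moderate"
  let level_value := levelHierarchy.getD level 2
  if level_value > st.2 then (level, level_value) else st

def get_activity_level_from_activities (activities_str : String) : String :=
  if activities_str == "" then "sedentary" else
  let activities := parseActivities activities_str
  if activities = [] then "sedentary" else
  let r := activities.foldl stepA ("sedentary", 0)
  r.1

-- ===== PORT B =====
-- B's for-loop over the fixed priority list: first level found in the present-set
def priorityScan (present : PySem.Set String) : List String → String
  | [] => "sedentary"
  | l :: rest => if PySem.Set.contains present l then l else priorityScan present rest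

def get_activity_level_from_activities_alt (activities_str : String) : String :=
  if activities_str == "" then "sedentary" else
  let activities := parseActivities activities_str
  if activities = [] then "sedentary" else
  let present := PySem.Set.ofList (activities.map (fun a => ACTIVITY_LEVELS.getD a "moderate"))
  priorityScan present ["very_active", "active", "moderate", "light", "sedentary"]

-- ===== PRECONDITION & SPEC =====
def Spec_get_activity_level_from_activities (activities_str : String) (out : String) : Prop := out = get_activity_level_from_activities_alt activities_str
instance (activities_str : String) (out : String) : Decidable (Spec_get_activity_level_from_activities activities_str out) := by unfold Spec_get_activity_level_from_activities; infer_instance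

-- ===== CLAIM (what is proved, stated in full; the proofs are below) =====
def Claim_equal_get_activity_level_from_activities : Prop := ∀ (activities_str : String), Dom_get_activity_level_from_activities activities_str → Spec_get_activity_level_from_activities activities_str (get_activity_level_from_activities activities_str)

-- ===== LEMMAS AND PROOFS =====

-- the five levels, lowest to highest
def LVLS : List String := ["sedentary", "light", "moderate", "active", "very_active"]

-- numeric rank of a level (= level_hierarchy.get(level, 2))
def rankL (l : String) : Int := levelHierarchy.getD l 2

-- the level with a given rank
def invR (m : Int) : String :=
  if m = 4 then "very_active" else if m = 3 then "active" else if m = 2 then "moderate"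
  else if m = 1 then "light" else "sedentary"

-- running max of ranks starting from v
def bestIn (ls : List String) (v : Int) : Int := ls.foldl (fun m x => max m (rankL x)) v

theorem f_mem_LVLS (a : String) : ACTIVITY_LEVELS.getD a "moderate" ∈ LVLS := by
  rw [PySem.Dict.getD_eq_get?_getD]
  cases h : ACTIVITY_LEVELS.get? a with
  | none => simp [LVLS]
  | some v =>
    have hm := PySem.Dict.mem_items_of_get?_eq_some _ h
    have hitems : ACTIVITY_LEVELS.items = [
      ("sitting", "sedentary"), ("desk_work", "sedentary"), ("office_job", "sedentary"),
      ("walking", "light"), ("gentle_yoga", "light"), ("casual_cycling", "light"), ("stretching", "light"),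
      ("jogging", "moderate"), ("running", "moderate"), ("swimming", "moderate"), ("basketball", "moderate"),
      ("soccer", "moderate"), ("gym_workout", "moderate"), ("dancing", "moderate"), ("hiking", "moderate"),
      ("sprinting", "active"), ("crossfit", "active"), ("competitive_sports", "active"),
      ("weight_training", "active"), ("martial_arts", "active"),
      ("professional_athlete", "very_active"), ("intense_daily_training", "very_active"),
      ("construction_work", "very_active")] := by rfl
    rw [hitems] at hm
    simp only [List.mem_cons, List.not_mem_nil, or_false, Prod.mk.injEq] at hm
    rcases hm with ⟨_,rfl⟩|⟨_,rfl⟩|⟨_,rfl⟩|⟨_,rfl⟩|⟨_,rfl⟩|⟨_,rfl⟩|⟨_,rfl⟩|⟨_,rfl⟩|⟨_,rfl⟩|⟨_,rfl⟩|⟨_,rfl⟩|⟨_,rfl⟩|⟨_,rfl⟩|⟨_,rfl⟩|⟨_,rfl⟩|⟨_,rfl⟩|⟨_,rfl⟩|⟨_,rfl⟩|⟨_,rfl⟩|⟨_,rfl⟩|⟨_,rfl⟩|⟨_,rfl⟩|⟨_,rfl⟩ <;> simp [LVLS]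

theorem rank_mem (l : String) (h : l ∈ LVLS) :
    rankL l = 0 ∨ rankL l = 1 ∨ rankL l = 2 ∨ rankL l = 3 ∨ rankL l = 4 := by
  simp only [LVLS, List.mem_cons, List.not_mem_nil, or_false] at h
  rcases h with rfl|rfl|rfl|rfl|rfl <;> decide

theorem le_bestIn (ls : List String) (v : Int) : v ≤ bestIn ls v := by
  induction ls generalizing v with
  | nil => exact le_refl v
  | cons x t ih =>
    simp only [bestIn, List.foldl_cons] at *
    exact le_trans (le_max_left v (rankL x)) (ih (max v (rankL x)))

theorem bestIn_le (ls : List String) (v : Int) (x : String) (hx : x ∈ ls) : rankL x ≤ bestIn ls v := by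
  induction ls generalizing v with
  | nil => cases hx
  | cons y t ih =>
    simp only [bestIn, List.foldl_cons] at *
    rcases List.mem_cons.mp hx with rfl | hmem
    · exact le_trans (le_max_right v (rankL x)) (le_bestIn t _)
    · exact ih _ hmem

theorem bestIn_cases (ls : List String) (v : Int) : bestIn ls v = v ∨ ∃ x ∈ ls, bestIn ls v = rankL x := by
  induction ls generalizing v with
  | nil => exact Or.inl rfl
  | cons y t ih =>
    simp only [bestIn, List.foldl_cons] at *
    rcases ih (max v (rankL y)) with h | ⟨x, hx, hr⟩
    · rcases max_choice v (rankL y) with hm | hm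
      · exact Or.inl (h.trans hm)
      · exact Or.inr ⟨y, List.mem_cons_self, h.trans hm⟩
    · exact Or.inr ⟨x, List.mem_cons_of_mem _ hx, hr⟩

-- A's loop body, applied to the already-looked-up level
def stepL (st : String × Int) (level : String) : String × Int :=
  if rankL level > st.2 then (level, rankL level) else st

theorem foldA_eq (ls : List String) (h : ∀ x ∈ ls, x ∈ LVLS) (l : String) (v : Int)
    (hl : l ∈ LVLS) (hv : rankL l = v) :
    ls.foldl stepL (l, v) = (invR (bestIn ls v), bestIn ls v) := by
  induction ls generalizing l v with
  | nil =>
    simp only [List.foldl_nil, bestIn, List.foldl_nil]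
    subst hv
    simp only [LVLS, List.mem_cons, List.not_mem_nil, or_false] at hl
    rcases hl with rfl|rfl|rfl|rfl|rfl <;> rfl
  | cons x t ih =>
    have hx : x ∈ LVLS := h x List.mem_cons_self
    have ht : ∀ y ∈ t, y ∈ LVLS := fun y hy => h y (List.mem_cons_of_mem _ hy)
    simp only [List.foldl_cons, bestIn, stepL]
    by_cases hgt : rankL x > v
    · rw [if_pos hgt]
      have hrec := ih ht x (rankL x) hx rfl
      simp only [bestIn] at hrec
      rw [hrec]
      have hmax : max v (rankL x) = rankL x := by omega
      rw [hmax]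
    · rw [if_neg hgt]
      have hrec := ih ht l v hl hv
      simp only [bestIn] at hrec
      rw [hrec]
      have hmax : max v (rankL x) = v := by omega
      rw [hmax]

theorem scan_eq (ls : List String) (h : ∀ x ∈ ls, x ∈ LVLS) :
    priorityScan (PySem.Set.ofList ls) ["very_active", "active", "moderate", "light", "sedentary"]
      = invR (bestIn ls 0) := by
  have hub : bestIn ls 0 ≤ 4 := by
    rcases bestIn_cases ls 0 with h0 | ⟨x, hx, hr⟩
    · omega
    · rcases rank_mem x (h x hx) with h'|h'|h'|h'|h' <;> omega
  have hlb : (0 : Int) ≤ bestIn ls 0 := le_bestIn ls 0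
  have hex : ∀ k : Int, bestIn ls 0 = k → k ≠ 0 → invR k ∈ ls := by
    intro k hk hk0
    rcases bestIn_cases ls 0 with h0 | ⟨x, hx, hr⟩
    · omega
    · have hxl := h x hx
      have hkr : k = rankL x := by rw [← hk, hr]
      simp only [LVLS, List.mem_cons, List.not_mem_nil, or_false] at hxl
      rcases hxl with rfl|rfl|rfl|rfl|rfl
      · exact absurd (hkr.trans (by decide : rankL "sedentary" = 0)) hk0
      · rw [hkr, (by decide : rankL "light" = 1),
          (by decide : invR 1 = "light")]; exact hx
      · rw [hkr, (by decide : rankL "moderate" = 2),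
          (by decide : invR 2 = "moderate")]; exact hx
      · rw [hkr, (by decide : rankL "active" = 3),
          (by decide : invR 3 = "active")]; exact hx
      · rw [hkr, (by decide : rankL "very_active" = 4),
          (by decide : invR 4 = "very_active")]; exact hx
  have hnot : ∀ lvl : String, rankL lvl > bestIn ls 0 → lvl ∉ ls := by
    intro lvl hgt hmem
    have := bestIn_le ls 0 lvl hmem
    omega
  have hc : bestIn ls 0 = 0 ∨ bestIn ls 0 = 1 ∨ bestIn ls 0 = 2 ∨ bestIn ls 0 = 3 ∨
      bestIn ls 0 = 4 := by omega
  rcases hc with hm|hm|hm|hm|hm <;> rw [hm]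
  · have hnVA : "very_active" ∉ ls := hnot _ (by rw [hm]; decide)
    have hnA : "active" ∉ ls := hnot _ (by rw [hm]; decide)
    have hnM : "moderate" ∉ ls := hnot _ (by rw [hm]; decide)
    have hnL : "light" ∉ ls := hnot _ (by rw [hm]; decide)
    simp [priorityScan, hnVA, hnA, hnM, hnL, invR]
  · have hL : "light" ∈ ls := by
      have := hex 1 hm (by norm_num); rwa [(by decide : invR 1 = "light")] at this
    have hnVA : "very_active" ∉ ls := hnot _ (by rw [hm]; decide)
    have hnA : "active" ∉ ls := hnot _ (by rw [hm]; decide)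
    have hnM : "moderate" ∉ ls := hnot _ (by rw [hm]; decide)
    simp [priorityScan, hL, hnVA, hnA, hnM, invR]
  · have hM : "moderate" ∈ ls := by
      have := hex 2 hm (by norm_num); rwa [(by decide : invR 2 = "moderate")] at this
    have hnVA : "very_active" ∉ ls := hnot _ (by rw [hm]; decide)
    have hnA : "active" ∉ ls := hnot _ (by rw [hm]; decide)
    simp [priorityScan, hM, hnVA, hnA, invR]
  · have hA : "active" ∈ ls := by
      have := hex 3 hm (by norm_num); rwa [(by decide : invR 3 = "active")] at this
    have hnVA : "very_active" ∉ ls := hnot _ (by rw [hm]; decide)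
    simp [priorityScan, hA, hnVA, invR]
  · have hVA : "very_active" ∈ ls := by
      have := hex 4 hm (by norm_num); rwa [(by decide : invR 4 = "very_active")] at this
    simp [priorityScan, hVA, invR]

-- ===== VERDICT (by name: the statement is the Claim_ definition above) =====
theorem get_activity_level_from_activities_spec : Claim_equal_get_activity_level_from_activities := by
  intro s _
  unfold Spec_get_activity_level_from_activities
  unfold get_activity_level_from_activities get_activity_level_from_activities_alt
  by_cases hs : (s == "") = true
  · simp [hs]
  · simp only [Bool.not_eq_true] at hs
    rw [hs]
    simp only [Bool.false_eq_true, if_false]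
    by_cases ha : parseActivities s = []
    · rw [if_pos ha, if_pos ha]
    · rw [if_neg ha, if_neg ha]
      have hls : ∀ x ∈ (parseActivities s).map (fun a => ACTIVITY_LEVELS.getD a "moderate"),
          x ∈ LVLS := by
        intro x hx
        obtain ⟨a, _, rfl⟩ := List.mem_map.mp hx
        exact f_mem_LVLS a
      have hfold : (parseActivities s).foldl stepA ("sedentary", 0) =
          ((parseActivities s).map (fun a => ACTIVITY_LEVELS.getD a "moderate")).foldl
            stepL ("sedentary", 0) := by
        rw [List.foldl_map]
        rfl
      rw [hfold, foldA_eq _ hls "sedentary" 0 (by decide) (by decide), scan_eq _ hls]
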